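-- pv_equiv track=rewrite | github.com/heartdrmd/scrabble-game | server.py | can_form_word
-- ===== SOURCE A (Python) =====
-- from collections import Counter
--
-- def can_form_word(word, available_letters):
--     """Check if word can be formed from available letters (including blanks)"""
--     available = Counter(available_letters)
--     blanks = available.get('?', 0)
--
--     for letter in word:
--         if available[letter] > 0:
--             available[letter] -= 1
--         elif blanks > 0:
--             blanks -= 1
--         else:
--             return False
--     return True
-- ===== SOURCE B (Python) =====
-- from collections import Counter
--
-- def can_form_word(word, available_letters):
--     """Check if word can be formed from available letters (including blanks)"""
--     need = Counter(word)
--     available = Counter(available_letters)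
--     blanks = available.get('?', 0)
--     shortfall = sum(max(0, cnt - available[c]) for c, cnt in need.items())
--     return shortfall <= blanks
-- ===== Notes on version B (the rewrite author's own statement) =====
-- stated objective: simpler
-- what changed: Replaces the per-character greedy loop that mutates a Counter and early-returns with an aggregate deficit computation: shortfall = sum over distinct letters of max(0, needed - available), returned as shortfall <= blank count.
import Mathlib
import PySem

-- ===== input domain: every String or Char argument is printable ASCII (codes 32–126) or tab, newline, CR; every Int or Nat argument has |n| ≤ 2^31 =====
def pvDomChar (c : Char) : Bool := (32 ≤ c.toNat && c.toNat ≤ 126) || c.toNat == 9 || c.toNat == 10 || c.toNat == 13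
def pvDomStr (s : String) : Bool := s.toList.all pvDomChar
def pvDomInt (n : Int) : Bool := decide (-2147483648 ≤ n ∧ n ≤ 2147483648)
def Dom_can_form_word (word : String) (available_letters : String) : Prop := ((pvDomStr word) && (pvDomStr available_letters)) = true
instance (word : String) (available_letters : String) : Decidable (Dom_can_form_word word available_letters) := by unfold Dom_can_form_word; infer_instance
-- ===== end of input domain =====

-- B replaces A's mutating greedy loop with an aggregate shortfall sum over the word's Counter (simpler decomposition, same cost).

-- ===== PORT A =====
-- the for-loop with early 'return False': state = (available, blanks)
def canFormLoop : List Char → PySem.Dict Char Int → Int → Bool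
  | [], _, _ => true
  | letter :: rest, available, blanks =>
    if available.getD letter 0 > 0 then
      canFormLoop rest (available.insert letter (available.getD letter 0 - 1)) blanks
    else if blanks > 0 then
      canFormLoop rest available (blanks - 1)
    else
      false

def can_form_word (word : String) (available_letters : String) : Bool :=
  let available := PySem.Dict.counter available_letters.toList
  let blanks := available.getD '?' 0
  canFormLoop word.toList available blanks

-- ===== PORT B =====
def can_form_word_alt (word : String) (available_letters : String) : Bool :=
  let need := PySem.Dict.counter word.toList
  let available := PySem.Dict.counter available_letters.toList
  let blanks := available.getD '?' 0
  let shortfall := (need.items.map (fun p => max 0 (p.2 - available.getD p.1 0))).foldl (· + ·) 0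
  decide (shortfall ≤ blanks)

-- ===== PRECONDITION & SPEC =====
def Spec_can_form_word (word : String) (available_letters : String) (out : Bool) : Prop := out = can_form_word_alt word available_letters
instance (word : String) (available_letters : String) (out : Bool) : Decidable (Spec_can_form_word word available_letters out) := by unfold Spec_can_form_word; infer_instance

-- ===== CLAIM (what is proved, stated in full; the proofs are below) =====
def Claim_equal_can_form_word : Prop := ∀ (word : String) (available_letters : String), Dom_can_form_word word available_letters → Spec_can_form_word word available_letters (can_form_word word available_letters)

-- ===== LEMMAS AND PROOFS =====

-- order-free shortfall: for each distinct letter of w, how far its need exceeds the supply d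
def pvS (w : List Char) (d : PySem.Dict Char Int) : Int :=
  ∑ c ∈ w.toFinset, max 0 ((w.count c : Int) - d.getD c 0)

lemma pvS_nonneg (w : List Char) (d : PySem.Dict Char Int) : 0 ≤ pvS w d := by
  refine Finset.sum_nonneg ?_
  intro c _
  exact le_max_left _ _

lemma pvS_cons_pos (c : Char) (rest : List Char) (d : PySem.Dict Char Int)
    (hv : 0 < d.getD c 0) :
    pvS (c :: rest) d = pvS rest (d.insert c (d.getD c 0 - 1)) := by
  unfold pvS
  rw [List.toFinset_cons]
  by_cases hc : c ∈ rest
  · rw [Finset.insert_eq_self.mpr (List.mem_toFinset.mpr hc)]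
    refine Finset.sum_congr rfl ?_
    intro x hx
    by_cases hxc : x = c
    · subst hxc
      rw [List.count_cons_self, PySem.Dict.getD_insert_self]
      push_cast
      omega
    · rw [List.count_cons_of_ne (Ne.symm hxc), PySem.Dict.getD_insert, if_neg hxc]
  · have hc' : c ∉ rest.toFinset := fun h => hc (List.mem_toFinset.mp h)
    rw [Finset.sum_insert hc']
    have hcount : rest.count c = 0 := List.count_eq_zero.mpr hc
    have hterm : max 0 (((c :: rest).count c : Int) - d.getD c 0) = 0 := by
      rw [List.count_cons_self, hcount]
      omega
    rw [hterm, zero_add]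
    refine Finset.sum_congr rfl ?_
    intro x hx
    have hxc : x ≠ c := fun h => hc' (h ▸ hx)
    rw [List.count_cons_of_ne (Ne.symm hxc), PySem.Dict.getD_insert, if_neg hxc]

lemma pvS_cons_zero (c : Char) (rest : List Char) (d : PySem.Dict Char Int)
    (hv : d.getD c 0 = 0) :
    pvS (c :: rest) d = 1 + pvS rest d := by
  unfold pvS
  rw [List.toFinset_cons]
  have hterm : max 0 (((c :: rest).count c : Int) - d.getD c 0) = (rest.count c : Int) + 1 := by
    rw [List.count_cons_self, hv]
    push_cast
    omega
  have hrest : ∀ x ∈ rest.toFinset.erase c,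
      max 0 (((c :: rest).count x : Int) - d.getD x 0) = max 0 ((rest.count x : Int) - d.getD x 0) := by
    intro x hx
    have hxc : x ≠ c := Finset.ne_of_mem_erase hx
    rw [List.count_cons_of_ne (Ne.symm hxc)]
  by_cases hc : c ∈ rest
  · have hcf : c ∈ rest.toFinset := List.mem_toFinset.mpr hc
    rw [Finset.insert_eq_self.mpr hcf]
    rw [← Finset.add_sum_erase _ _ hcf, ← Finset.add_sum_erase _ _ hcf, hterm,
      Finset.sum_congr rfl hrest]
    have : max 0 ((rest.count c : Int) - d.getD c 0) = (rest.count c : Int) := by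
      rw [hv]; omega
    rw [this]
    ring
  · have hc' : c ∉ rest.toFinset := fun h => hc (List.mem_toFinset.mp h)
    rw [Finset.sum_insert hc', hterm]
    have herase : rest.toFinset.erase c = rest.toFinset := Finset.erase_eq_self.mpr hc'
    have := Finset.sum_congr rfl hrest
    rw [herase] at this
    rw [this]
    have hcount : rest.count c = 0 := List.count_eq_zero.mpr hc
    rw [hcount]
    push_cast
    ring

lemma canFormLoop_eq (w : List Char) : ∀ (d : PySem.Dict Char Int) (b : Int),
    (∀ c, 0 ≤ d.getD c 0) → 0 ≤ b →
    canFormLoop w d b = decide (pvS w d ≤ b) := by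
  induction w with
  | nil =>
    intro d b _ hb
    simp [canFormLoop, pvS, hb]
  | cons c rest ih =>
    intro d b hd hb
    by_cases hv : d.getD c 0 > 0
    · have hd' : ∀ x, 0 ≤ (d.insert c (d.getD c 0 - 1)).getD x 0 := by
        intro x
        rw [PySem.Dict.getD_insert]
        split
        · omega
        · exact hd x
      rw [canFormLoop, if_pos hv, ih _ b hd' hb, pvS_cons_pos c rest d hv]
    · have hv0 : d.getD c 0 = 0 := le_antisymm (by omega) (hd c)
      rw [canFormLoop, if_neg hv, pvS_cons_zero c rest d hv0]
      by_cases hbpos : b > 0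
      · rw [if_pos hbpos, ih d (b - 1) hd (by omega)]
        simp only [decide_eq_decide]
        omega
      · rw [if_neg hbpos]
        have := pvS_nonneg rest d
        have : ¬ (1 + pvS rest d ≤ b) := by omega
        simp [this]

lemma toFinset_ofList (xs : List Char) : (PySem.Set.ofList xs).toFinset = xs.toFinset := by
  ext x
  simp [PySem.Set.mem_ofList]

lemma alt_eq_pvS (word available_letters : String) :
    can_form_word_alt word available_letters
      = decide (pvS word.toList (PySem.Dict.counter available_letters.toList)
          ≤ (PySem.Dict.counter available_letters.toList).getD '?' 0) := by
  unfold can_form_word_alt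
  simp only [PySem.Dict.items_counter, List.map_map, Function.comp_def, ← List.sum_eq_foldl]
  congr 1
  have h := List.sum_toFinset
    (fun c => max 0 ((word.toList.count c : Int)
      - (PySem.Dict.counter available_letters.toList).getD c 0))
    (PySem.Set.nodup_ofList word.toList)
  rw [toFinset_ofList] at h
  unfold pvS
  rw [h]

-- ===== VERDICT (by name: the statement is the Claim_ definition above) =====
theorem can_form_word_spec : Claim_equal_can_form_word := by
  intro word available_letters _
  unfold Spec_can_form_word
  rw [alt_eq_pvS]
  unfold can_form_word
  have hd : ∀ c, 0 ≤ (PySem.Dict.counter available_letters.toList).getD c 0 := by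
    intro c
    rw [PySem.Dict.getD_counter]
    positivity
  have hb : 0 ≤ (PySem.Dict.counter available_letters.toList).getD '?' 0 := hd '?'
  exact canFormLoop_eq word.toList _ _ hd hb
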